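-- pv_equiv track=rewrite | github.com/mordbite/Text-Adventure | main.py | split_sentences_preserving_quotes
-- ===== SOURCE A (Python) =====
-- def split_sentences_preserving_quotes(full_text: str) -> list[str]:
-- 	"""Splits text into sentences while respecting quoted text."""
-- 	merged_text = ""
-- 	is_inside_quotes = False
--
-- 	for character in full_text:
-- 		if character == '"':
-- 			is_inside_quotes = not is_inside_quotes
-- 		if character == "\n" and is_inside_quotes:
-- 			continue
-- 		merged_text += character
--
-- 	sentences = []
-- 	current_sentence = ""
-- 	is_inside_quotes = False
--
-- 	for index, character in enumerate(merged_text):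
-- 		current_sentence += character
--
-- 		if character == '"':
-- 			is_inside_quotes = not is_inside_quotes
-- 		elif character in ".!?" and not is_inside_quotes:
-- 			next_character = merged_text[index + 1] if index + 1 < len(merged_text) else ""
-- 			if next_character not in ".!?":
-- 				sentences.append(current_sentence.strip())
-- 				current_sentence = ""
--
-- 	if current_sentence.strip():
-- 		sentences.append(current_sentence.strip())
--
-- 	return sentences
-- ===== SOURCE B (Python) =====
-- def split_sentences_preserving_quotes(full_text: str) -> list[str]:
--     """Single pass: merge-and-split fused; newlines inside quotes are dropped on the fly."""
--     sentences = []
--     buf = []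
--     inside = False
--     n = len(full_text)
--     for i, ch in enumerate(full_text):
--         if ch == '"':
--             inside = not inside
--             buf.append(ch)
--             continue
--         if ch == '\n' and inside:
--             continue
--         buf.append(ch)
--         if ch in '.!?' and not inside and i + 1 < n and full_text[i + 1] not in '.!?':
--             sentences.append(''.join(buf).strip())
--             buf = []
--     tail = ''.join(buf).strip()
--     if tail:
--         sentences.append(tail)
--     return sentences
-- ===== Notes on version B (the rewrite author's own statement) =====
-- stated objective: simpler
-- what changed: A builds an intermediate merged_text string in a first pass and then splits it in a second indexed pass; B fuses both into a single pass over the original text, dropping quoted newlines on the fly and using full_text[i+1] directly as the lookahead (which is valid because the character right after an unquoted sentence terminator is never a dropped newline).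
import Mathlib
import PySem

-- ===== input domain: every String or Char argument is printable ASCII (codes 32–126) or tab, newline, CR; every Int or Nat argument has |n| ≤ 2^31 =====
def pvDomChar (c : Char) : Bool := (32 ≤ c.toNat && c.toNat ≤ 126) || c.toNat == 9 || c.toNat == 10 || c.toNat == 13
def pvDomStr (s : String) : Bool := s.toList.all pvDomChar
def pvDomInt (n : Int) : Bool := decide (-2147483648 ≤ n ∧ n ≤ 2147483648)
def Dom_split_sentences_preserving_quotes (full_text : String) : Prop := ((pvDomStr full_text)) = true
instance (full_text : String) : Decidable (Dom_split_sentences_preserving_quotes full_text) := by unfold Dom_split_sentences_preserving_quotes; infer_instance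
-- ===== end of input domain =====

-- B fuses A's two passes (build merged_text, then split it) into one indexed pass over the
-- original text; same return value, objective: simpler (one traversal, no intermediate string).

-- character in ".!?"
def pvIsPunct (c : Char) : Bool := c == '.' || c == '!' || c == '?'

-- ===== PORT A =====
-- first loop: build merged_text (newlines inside quotes dropped); state (merged, is_inside_quotes)
def pvStepMerge (st : List Char × Bool) (c : Char) : List Char × Bool :=
  let q := if c == '"' then !st.2 else st.2
  if c == '\n' && q then (st.1, q) else (st.1 ++ [c], q)

-- second loop: state (sentences, current_sentence, is_inside_quotes), index lookahead into merged
def pvStepSplit (merged : List Char) (st : List String × List Char × Bool) (ic : Int × Char) :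
    List String × List Char × Bool :=
  let cur := st.2.1 ++ [ic.2]
  if ic.2 == '"' then (st.1, cur, !st.2.2)
  else if pvIsPunct ic.2 && !st.2.2 then
    -- Python: next_character = merged[i+1] if i+1 < len else ""; since '"" not in ".!?"' is
    -- False, the out-of-range case does NOT split — exactly the `none` branch here.
    match PySem.List.pyGet? merged (ic.1 + 1) with
    | some d => if pvIsPunct d then (st.1, cur, st.2.2)
                else (st.1 ++ [String.ofList (PySem.Chars.strip cur)], ([] : List Char), st.2.2)
    | none => (st.1, cur, st.2.2)
  else (st.1, cur, st.2.2)

def split_sentences_preserving_quotes (full_text : String) : List String :=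
  let merged := (full_text.toList.foldl pvStepMerge (([] : List Char), false)).1
  let st := (PySem.List.enumerate merged 0).foldl (pvStepSplit merged) (([] : List String), ([] : List Char), false)
  if PySem.Chars.strip st.2.1 ≠ [] then st.1 ++ [String.ofList (PySem.Chars.strip st.2.1)] else st.1

-- ===== PORT B =====
-- single loop over the original text; state (sentences, buf, inside); lookahead full_text[i+1]
def pvStepB (full : List Char) (st : List String × List Char × Bool) (ic : Int × Char) :
    List String × List Char × Bool :=
  if ic.2 == '"' then (st.1, st.2.1 ++ [ic.2], !st.2.2)
  else if ic.2 == '\n' && st.2.2 then st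
  else
    let buf := st.2.1 ++ [ic.2]
    -- Python: ch in '.!?' and not inside and i+1 < n and full_text[i+1] not in '.!?'
    if pvIsPunct ic.2 && !st.2.2 &&
        (match PySem.List.pyGet? full (ic.1 + 1) with
         | some d => !pvIsPunct d
         | none => false) then
      (st.1 ++ [String.ofList (PySem.Chars.strip buf)], ([] : List Char), st.2.2)
    else (st.1, buf, st.2.2)

def split_sentences_preserving_quotes_alt (full_text : String) : List String :=
  let full := full_text.toList
  let st := (PySem.List.enumerate full 0).foldl (pvStepB full) (([] : List String), ([] : List Char), false)
  if PySem.Chars.strip st.2.1 ≠ [] then st.1 ++ [String.ofList (PySem.Chars.strip st.2.1)] else st.1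

-- ===== PRECONDITION & SPEC =====
def Spec_split_sentences_preserving_quotes (full_text : String) (out : List String) : Prop := out = split_sentences_preserving_quotes_alt full_text
instance (full_text : String) (out : List String) : Decidable (Spec_split_sentences_preserving_quotes full_text out) := by unfold Spec_split_sentences_preserving_quotes; infer_instance

-- ===== CLAIM (what is proved, stated in full; the proofs are below) =====
def Claim_equal_split_sentences_preserving_quotes : Prop := ∀ (full_text : String), Dom_split_sentences_preserving_quotes full_text → Spec_split_sentences_preserving_quotes full_text (split_sentences_preserving_quotes full_text)

-- ===== LEMMAS AND PROOFS =====

-- recursive restatement of A's first loop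
def pvMerge : Bool → List Char → List Char
  | _, [] => []
  | q, c :: cs =>
    let q' := if c == '"' then !q else q
    if c == '\n' && q' then pvMerge q' cs else c :: pvMerge q' cs

-- lookahead: is there a next character and is it NOT a split point?
-- (true = "do not split here": either no next character or it is in ".!?")
def pvHeadPunct : List Char → Bool
  | d :: _ => pvIsPunct d
  | [] => true

-- recursive restatement of A's second loop, lookahead = head of the rest
def pvP2 : Bool → List Char → List Char → List String
  | _, cur, [] => if PySem.Chars.strip cur ≠ [] then [String.ofList (PySem.Chars.strip cur)] else []
  | q, cur, c :: cs =>
    if c == '"' then pvP2 (!q) (cur ++ [c]) cs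
    else if (pvIsPunct c && !q) && !pvHeadPunct cs then
      String.ofList (PySem.Chars.strip (cur ++ [c])) :: pvP2 q [] cs
    else pvP2 q (cur ++ [c]) cs

-- recursive restatement of B's loop
def pvB : Bool → List Char → List Char → List String
  | _, buf, [] => if PySem.Chars.strip buf ≠ [] then [String.ofList (PySem.Chars.strip buf)] else []
  | q, buf, c :: cs =>
    if c == '"' then pvB (!q) (buf ++ [c]) cs
    else if c == '\n' && q then pvB q buf cs
    else if (pvIsPunct c && !q) && !pvHeadPunct cs then
      String.ofList (PySem.Chars.strip (buf ++ [c])) :: pvB q [] cs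
    else pvB q (buf ++ [c]) cs

-- the common epilogue: append the trailing sentence if its strip is nonempty
def pvFin (st : List String × List Char × Bool) : List String :=
  if PySem.Chars.strip st.2.1 ≠ [] then st.1 ++ [String.ofList (PySem.Chars.strip st.2.1)] else st.1

lemma pvMergeFold (l : List Char) : ∀ (acc : List Char) (q : Bool),
    (l.foldl pvStepMerge (acc, q)).1 = acc ++ pvMerge q l := by
  induction l with
  | nil => intro acc q; simp [pvMerge]
  | cons c cs ih =>
    intro acc q
    simp only [List.foldl_cons, pvStepMerge, pvMerge, ih]
    split_ifs <;> simp [List.append_assoc]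

lemma pvFoldA (l : List Char) : ∀ (pre : List Char) (sens : List String) (cur : List Char) (q : Bool),
    pvFin ((PySem.List.enumerate l (pre.length : Int)).foldl (pvStepSplit (pre ++ l)) (sens, cur, q))
    = sens ++ pvP2 q cur l := by
  induction l with
  | nil =>
    intro pre sens cur q
    simp only [PySem.List.enumerate_nil, List.foldl_nil, pvFin, pvP2]
    split_ifs <;> simp
  | cons c cs ih =>
    intro pre sens cur q
    have hidx : (pre.length : Int) + 1 = ((pre.length + 1 : Nat) : Int) := by push_cast; ring
    have hget : PySem.List.pyGet? (pre ++ c :: cs) ((pre.length : Int) + 1) = cs[0]? := by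
      rw [hidx, PySem.List.pyGet?_natCast, List.getElem?_append_right (by omega)]
      simp
    have hpp : pre ++ c :: cs = (pre ++ [c]) ++ cs := by simp
    have hlen : (pre.length : Int) + 1 = (((pre ++ [c]).length : Nat) : Int) := by simp
    rw [PySem.List.enumerate_cons, List.foldl_cons]
    simp only [pvStepSplit, hget]
    by_cases hc : (c == '"') = true
    · simp only [hc, if_true]
      rw [hpp] at *
      rw [hlen, ih]
      simp [pvP2, hc]
    · by_cases hp : (pvIsPunct c && !q) = true
      · cases cs with
        | nil =>
          simp only [List.getElem?_nil, hc, Bool.false_eq_true, if_false, hp, if_true]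
          rw [hpp] at *
          rw [hlen, ih]
          simp [pvP2, pvHeadPunct, hc, hp]
        | cons d ds =>
          by_cases hd : pvIsPunct d = true
          · simp only [List.getElem?_cons_zero, hc, Bool.false_eq_true, if_false, hp, if_true, hd]
            rw [hpp] at *
            rw [hlen, ih]
            simp [pvP2, pvHeadPunct, hc, hp, hd]
          · simp only [List.getElem?_cons_zero, hc, Bool.false_eq_true, if_false, hp, if_true,
              hd]
            rw [hpp] at *
            rw [hlen, ih]
            simp [pvP2, pvHeadPunct, hc, hp, hd, List.append_assoc]
      · simp only [hc, hp, Bool.false_eq_true, if_false]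
        rw [hpp] at *
        rw [hlen, ih]
        simp [pvP2, hc, hp]

lemma pvFoldB (l : List Char) : ∀ (pre : List Char) (sens : List String) (buf : List Char) (q : Bool),
    pvFin ((PySem.List.enumerate l (pre.length : Int)).foldl (pvStepB (pre ++ l)) (sens, buf, q))
    = sens ++ pvB q buf l := by
  induction l with
  | nil =>
    intro pre sens buf q
    simp only [PySem.List.enumerate_nil, List.foldl_nil, pvFin, pvB]
    split_ifs <;> simp
  | cons c cs ih =>
    intro pre sens buf q
    have hidx : (pre.length : Int) + 1 = ((pre.length + 1 : Nat) : Int) := by push_cast; ring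
    have hget : PySem.List.pyGet? (pre ++ c :: cs) ((pre.length : Int) + 1) = cs[0]? := by
      rw [hidx, PySem.List.pyGet?_natCast, List.getElem?_append_right (by omega)]
      simp
    have hpp : pre ++ c :: cs = (pre ++ [c]) ++ cs := by simp
    have hlen : (pre.length : Int) + 1 = (((pre ++ [c]).length : Nat) : Int) := by simp
    rw [PySem.List.enumerate_cons, List.foldl_cons]
    simp only [pvStepB, hget]
    by_cases hc : (c == '"') = true
    · simp only [hc, if_true]
      rw [hpp] at *
      rw [hlen, ih]
      simp [pvB, hc]
    · by_cases hnq : (c == '\n' && q) = true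
      · simp only [hc, Bool.false_eq_true, if_false, hnq, if_true]
        rw [hpp] at *
        rw [hlen, ih]
        simp [pvB, hc, hnq]
      · cases cs with
        | nil =>
          simp only [List.getElem?_nil, hc, hnq, Bool.false_eq_true, if_false]
          rw [hpp] at *
          rw [hlen, ih]
          simp [pvB, pvHeadPunct, hc, hnq]
        | cons d ds =>
          simp only [List.getElem?_cons_zero, hc, hnq, Bool.false_eq_true, if_false]
          rw [hpp] at *
          rw [hlen, ih]
          by_cases hcnd : ((pvIsPunct c && !q) && !pvIsPunct d) = true
          · simp [pvB, pvHeadPunct, hc, hnq, hcnd, List.append_assoc]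
          · simp [pvB, pvHeadPunct, hc, hnq, hcnd]

-- when not inside quotes the next character survives merging, so the lookaheads agree
lemma pvHead_merge (cs : List Char) : pvHeadPunct (pvMerge false cs) = pvHeadPunct cs := by
  cases cs with
  | nil => rfl
  | cons d ds =>
    by_cases hd : d = '"'
    · subst hd; simp [pvMerge, pvHeadPunct]
    · by_cases hdn : d = '\n'
      · subst hdn; simp [pvMerge, pvHeadPunct]
      · simp [pvMerge, pvHeadPunct, hd]

lemma pvMain (l : List Char) : ∀ (q : Bool) (cur : List Char),
    pvP2 q cur (pvMerge q l) = pvB q cur l := by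
  induction l with
  | nil => intro q cur; simp [pvMerge, pvP2, pvB]
  | cons c cs ih =>
    intro q cur
    by_cases hc : c = '"'
    · subst hc
      simp [pvMerge, pvP2, pvB, ih]
    · by_cases hn : c = '\n'
      · subst hn
        cases q with
        | true => simp [pvMerge, pvB, ih]
        | false => simp [pvMerge, pvP2, pvB, pvIsPunct, ih]
      · have hcb : (c == '"') = false := by simp [hc]
        have hnb : (c == '\n') = false := by simp [hn]
        have hkept : pvMerge q (c :: cs) = c :: pvMerge q cs := by
          simp [pvMerge, hc, hn]
        rw [hkept]
        by_cases hpq : (pvIsPunct c && !q) = true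
        · have hq : q = false := by
            cases q
            · rfl
            · simp at hpq
          subst hq
          simp only [pvP2, pvB, hcb, hnb, Bool.false_eq_true, if_false, Bool.false_and]
          rw [pvHead_merge]
          by_cases hh : pvHeadPunct cs = true
          · simp [hh, ih]
          · simp [hh, ih]
        · have hpq' : (pvIsPunct c && !q) = false := by
            cases h : (pvIsPunct c && !q)
            · rfl
            · exact absurd h hpq
          simp only [pvP2, pvB, hcb, hnb, Bool.false_eq_true, if_false, hpq', Bool.false_and]
          exact ih q (cur ++ [c])

-- ===== VERDICT (by name: the statement is the Claim_ definition above) =====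
theorem split_sentences_preserving_quotes_spec : Claim_equal_split_sentences_preserving_quotes := by
  intro ft _
  unfold Spec_split_sentences_preserving_quotes
  unfold split_sentences_preserving_quotes split_sentences_preserving_quotes_alt
  have hA := pvFoldA (pvMerge false ft.toList) [] [] [] false
  have hB := pvFoldB ft.toList [] [] [] false
  simp only [List.nil_append, List.length_nil, Nat.cast_zero, pvFin] at hA hB
  simp only [pvMergeFold ft.toList [] false, List.nil_append]
  rw [hA, hB, pvMain]
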